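-- pv_equiv track=rewrite | github.com/davidkgp/python_tryouts | Exercise_Function.py | animal_crackers
-- ===== SOURCE A (Python) =====
-- def animal_crackers(str):
--     first_set=set()
--     for x in str.split():
--         first_set.add(x[0].lower())
--
--     if len(first_set) ==1 :
--         return True
--     else:
--         return False
-- ===== SOURCE B (Python) =====
-- def animal_crackers(str):
--     words = str.split()
--     if not words:
--         return False
--     ref = words[0][0].lower()
--     return all(w[0].lower() == ref for w in words)
-- ===== Notes on version B (the rewrite author's own statement) =====
-- stated objective: simpler
-- what changed: Replaces the build-a-set-of-first-letters-then-count strategy with a reference-compare all() predicate that keeps no auxiliary container and short-circuits on the first mismatch.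
import Mathlib
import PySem

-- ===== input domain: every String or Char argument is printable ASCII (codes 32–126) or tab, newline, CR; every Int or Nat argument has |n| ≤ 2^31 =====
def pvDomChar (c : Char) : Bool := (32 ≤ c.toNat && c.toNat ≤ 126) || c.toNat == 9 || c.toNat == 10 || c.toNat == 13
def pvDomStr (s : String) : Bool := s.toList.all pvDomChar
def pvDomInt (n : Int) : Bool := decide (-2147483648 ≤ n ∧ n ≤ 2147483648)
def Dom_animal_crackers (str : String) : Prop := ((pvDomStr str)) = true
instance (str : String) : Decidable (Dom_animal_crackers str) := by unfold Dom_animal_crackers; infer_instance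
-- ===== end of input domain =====

-- B replaces A's set-of-first-letters-and-count with a reference-compare all() predicate (simpler; no auxiliary container).

-- first letter of a word, lowercased; words produced by split() are never empty,
-- so pyGetD with any default is exact here (x[0] never raises).
def pvFirstLower (x : String) : Char :=
  PySem.Chars.lowerChar (PySem.List.pyGetD x.toList 0 ' ')

-- ===== PORT A =====
def animal_crackers (str : String) : Bool :=
  let first_set : PySem.Set Char :=
    (PySem.Str.split₀ str).foldl (fun fs x => PySem.Set.add fs (pvFirstLower x)) PySem.Set.empty
  if PySem.Set.len first_set = 1 then true else false

-- ===== PORT B =====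
def animal_crackers_alt (str : String) : Bool :=
  match PySem.Str.split₀ str with
  | [] => false
  | w :: ws => (w :: ws).all (fun x => pvFirstLower x == pvFirstLower w)

-- ===== PRECONDITION & SPEC =====
def Spec_animal_crackers (str : String) (out : Bool) : Prop := out = animal_crackers_alt str
instance (str : String) (out : Bool) : Decidable (Spec_animal_crackers str out) := by unfold Spec_animal_crackers; infer_instance

-- ===== CLAIM (what is proved, stated in full; the proofs are below) =====
def Claim_equal_animal_crackers : Prop := ∀ (str : String), Dom_animal_crackers str → Spec_animal_crackers str (animal_crackers str)

-- ===== LEMMAS AND PROOFS =====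

theorem pv_length_le_foldl_add (l : List Char) (s : PySem.Set Char) :
    s.length ≤ (l.foldl PySem.Set.add s).length := by
  induction l generalizing s with
  | nil => simp
  | cons b t ih =>
    refine le_trans ?_ (ih (PySem.Set.add s b))
    simp [PySem.Set.add]
    split <;> simp

theorem pv_foldl_add_len_one (l : List Char) (a : Char) :
    ((l.foldl PySem.Set.add [a]).length = 1) ↔ (∀ x ∈ l, x = a) := by
  induction l with
  | nil => simp
  | cons b t ih =>
    by_cases hb : b = a
    · subst hb
      simpa [PySem.Set.add] using ih
    · simp only [List.foldl_cons]
      have hadd : PySem.Set.add [a] b = [a, b] := by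
        simp [PySem.Set.add, PySem.Set.contains, hb]
      rw [hadd]
      constructor
      · intro h
        have := pv_length_le_foldl_add t [a, b]
        simp at this
        omega
      · intro h
        exact absurd (h b (by simp)) hb

theorem animal_crackers_eq_alt (str : String) :
    animal_crackers str = animal_crackers_alt str := by
  unfold animal_crackers animal_crackers_alt
  cases hsp : PySem.Str.split₀ str with
  | nil => simp [PySem.Set.len, PySem.Set.empty]
  | cons w ws =>
    simp only [List.foldl_cons, PySem.Set.len]
    have hadd : PySem.Set.add PySem.Set.empty (pvFirstLower w) = [pvFirstLower w] := by
      simp [PySem.Set.add, PySem.Set.empty, PySem.Set.contains]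
    simp only [hadd]
    have hfold : ws.foldl (fun fs x => PySem.Set.add fs (pvFirstLower x)) [pvFirstLower w]
        = (ws.map pvFirstLower).foldl PySem.Set.add [pvFirstLower w] := by
      rw [List.foldl_map]
    simp only [hfold, Nat.cast_eq_one]
    by_cases h : ∀ x ∈ ws.map pvFirstLower, x = pvFirstLower w
    · have hlen := (pv_foldl_add_len_one (ws.map pvFirstLower) (pvFirstLower w)).mpr h
      simp only [hlen, if_true, List.all_cons, beq_self_eq_true, Bool.true_and]
      symm
      rw [List.all_eq_true]
      intro x hx
      exact beq_iff_eq.mpr (h (pvFirstLower x) (List.mem_map_of_mem hx))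
    · have hlen : ((ws.map pvFirstLower).foldl PySem.Set.add [pvFirstLower w]).length ≠ 1 := by
        intro hc; exact h ((pv_foldl_add_len_one _ _).mp hc)
      simp only [if_neg hlen]
      symm
      simp only [List.all_cons, beq_self_eq_true, Bool.true_and]
      rw [List.all_eq_false]
      simp only [not_forall] at h
      obtain ⟨y, hy, hne⟩ := h
      obtain ⟨x, hx, rfl⟩ := List.mem_map.mp hy
      exact ⟨x, hx, by simpa using hne⟩

-- ===== VERDICT (by name: the statement is the Claim_ definition above) =====
theorem animal_crackers_spec : Claim_equal_animal_crackers := by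
  intro str _
  unfold Spec_animal_crackers
  exact animal_crackers_eq_alt str
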